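-- pv_equiv track=rewrite | github.com/AlbertoGuastalla/Ambulance-Routing | CS3.py | getAllCombination
-- ===== SOURCE A (Python) =====
-- def getAllCombination(allCombination, currentCombination, firstList, secondList):
--     if len(firstList) == 1 and len(secondList) == 1:
--         combination = currentCombination + [(firstList[0], secondList[0])]
--         allCombination.append(combination)
--         return allCombination
--     else:
--         for i in range(0, len(firstList)):
--             sl = secondList.copy()
--             tmp = [(firstList[0], sl.pop(i))]
--             allCombination = getAllCombination(allCombination, currentCombination + tmp, firstList[1:], sl)
--
--         return allCombination
-- ===== SOURCE B (Python) =====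
-- def getAllCombination(allCombination, currentCombination, firstList, secondList):
--     if not firstList or len(firstList) != len(secondList):
--         return allCombination
--     rows = [(currentCombination, secondList)]
--     for x in firstList:
--         rows = [(partial + [(x, rest[i])], rest[:i] + rest[i + 1:])
--                 for partial, rest in rows for i in range(len(rest))]
--     allCombination.extend(partial for partial, rest in rows)
--     return allCombination
-- ===== Notes on version B (the rewrite author's own statement) =====
-- stated objective: alternative
-- what changed: Replaces A's recursion (per-call index loop with list pop) by an early equal-length return plus an iterative breadth-first expansion of (partial, remaining) rows over firstList, collected in one final pass; unequal lengths yield no perfect matching, so B returns immediately where A recurses to produce nothing.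
import Mathlib
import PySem

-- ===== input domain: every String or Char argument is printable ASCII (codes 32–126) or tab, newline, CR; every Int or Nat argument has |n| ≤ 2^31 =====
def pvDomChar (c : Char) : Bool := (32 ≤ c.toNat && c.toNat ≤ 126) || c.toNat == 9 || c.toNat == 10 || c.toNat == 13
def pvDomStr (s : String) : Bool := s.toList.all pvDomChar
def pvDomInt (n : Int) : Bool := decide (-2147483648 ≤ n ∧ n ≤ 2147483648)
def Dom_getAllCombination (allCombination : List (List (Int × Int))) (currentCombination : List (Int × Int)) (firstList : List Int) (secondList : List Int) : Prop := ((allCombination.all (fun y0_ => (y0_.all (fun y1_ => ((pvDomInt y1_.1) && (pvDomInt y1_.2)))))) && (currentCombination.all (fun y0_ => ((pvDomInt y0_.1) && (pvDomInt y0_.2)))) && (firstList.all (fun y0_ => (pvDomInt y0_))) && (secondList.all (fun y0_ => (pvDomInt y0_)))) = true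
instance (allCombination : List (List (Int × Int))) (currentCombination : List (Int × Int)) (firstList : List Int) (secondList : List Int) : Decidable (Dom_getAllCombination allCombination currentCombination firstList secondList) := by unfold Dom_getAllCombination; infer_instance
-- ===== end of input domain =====

-- B replaces A's recursion by an early equal-length check plus an iterative breadth-first
-- expansion of (partial, remaining) rows, collected in one final pass (return-value equivalence:
-- A mutates allCombination via append, B via extend — both extend the same passed-in list).

-- ===== PORT A =====
mutual
  -- literal port of A; where Python's sl.pop(i) raises IndexError (excluded by Pre_) the port returns the accumulator
  def getAllCombination (allCombination : List (List (Int × Int))) (currentCombination : List (Int × Int)) (firstList : List Int) (secondList : List Int) : List (List (Int × Int)) :=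
    if firstList.length = 1 ∧ secondList.length = 1 then
      allCombination ++ [currentCombination ++ [((PySem.List.pyGet? firstList 0).getD 0, (PySem.List.pyGet? secondList 0).getD 0)]]
    else
      match firstList with
      | [] => allCombination
      | f :: rest => pvLoopA allCombination currentCombination f rest secondList (PySem.List.pyRange 0 (f :: rest).length 1)
  termination_by (firstList.length, 0)

  -- the 'for i in range(0, len(firstList))' loop of A
  def pvLoopA (ac : List (List (Int × Int))) (cc : List (Int × Int)) (f : Int) (rest : List Int) (sl : List Int) (idxs : List Int) : List (List (Int × Int)) :=
    match idxs with
    | [] => ac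
    | i :: is =>
      match PySem.List.pop? sl i with
      | none => ac  -- IndexError (outside Pre_)
      | some pr => pvLoopA (getAllCombination ac (cc ++ [(f, pr.1)]) rest pr.2) cc f rest sl is
  termination_by (rest.length, idxs.length)
end

-- ===== PORT B =====
-- the inner comprehension of Source B: expand one row (partial, rest) with element x
def pvExpand (x : Int) (pr : List (Int × Int) × List Int) : List (List (Int × Int) × List Int) :=
  (PySem.List.pyRange 0 pr.2.length 1).map (fun i =>
    (pr.1 ++ [(x, (PySem.List.pyGet? pr.2 i).getD 0)],
     PySem.List.slice pr.2 none (some i) ++ PySem.List.slice pr.2 (some (i + 1)) none))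

-- one round of Source B's loop: rows = [... for partial, rest in rows for i in range(len(rest))]
def pvStep (rows : List (List (Int × Int) × List Int)) (x : Int) : List (List (Int × Int) × List Int) :=
  rows.flatMap (pvExpand x)

def getAllCombination_alt (allCombination : List (List (Int × Int))) (currentCombination : List (Int × Int)) (firstList : List Int) (secondList : List Int) : List (List (Int × Int)) :=
  if firstList = [] ∨ firstList.length ≠ secondList.length then allCombination
  else
    allCombination ++
      (firstList.foldl pvStep [(currentCombination, secondList)]).map (fun pr => pr.1)

-- ===== PRECONDITION & SPEC =====
-- Pre_ excludes exactly the inputs where A raises IndexError (sl.pop(i) with i past the end):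
-- those with len(firstList) > len(secondList).
def Pre_getAllCombination (allCombination : List (List (Int × Int))) (currentCombination : List (Int × Int)) (firstList : List Int) (secondList : List Int) : Prop :=
  firstList.length ≤ secondList.length
instance (allCombination : List (List (Int × Int))) (currentCombination : List (Int × Int)) (firstList : List Int) (secondList : List Int) : Decidable (Pre_getAllCombination allCombination currentCombination firstList secondList) := by unfold Pre_getAllCombination; infer_instance

def pvWitness_getAllCombination : (List (List (Int × Int))) × (List (Int × Int)) × List Int × List Int := ([], [], [1], [2])

def Spec_getAllCombination (allCombination : List (List (Int × Int))) (currentCombination : List (Int × Int)) (firstList : List Int) (secondList : List Int) (out : List (List (Int × Int))) : Prop := out = getAllCombination_alt allCombination currentCombination firstList secondList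
instance (allCombination : List (List (Int × Int))) (currentCombination : List (Int × Int)) (firstList : List Int) (secondList : List Int) (out : List (List (Int × Int))) : Decidable (Spec_getAllCombination allCombination currentCombination firstList secondList out) := by unfold Spec_getAllCombination; infer_instance

-- ===== CLAIM (what is proved, stated in full; the proofs are below) =====
def Claim_equal_getAllCombination : Prop := ∀ (allCombination : List (List (Int × Int))) (currentCombination : List (Int × Int)) (firstList : List Int) (secondList : List Int), Dom_getAllCombination allCombination currentCombination firstList secondList → Pre_getAllCombination allCombination currentCombination firstList secondList → Spec_getAllCombination allCombination currentCombination firstList secondList (getAllCombination allCombination currentCombination firstList secondList)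


-- ===== LEMMAS AND PROOFS =====

-- B's final collection pass, as a function of the starting rows
def pvF (fl : List Int) (rows : List (List (Int × Int) × List Int)) : List (List (Int × Int)) :=
  (fl.foldl pvStep rows).map (fun pr => pr.1)

lemma pvFlatMap_congr {α β : Type} {l : List α} {f g : α → List β}
    (h : ∀ x ∈ l, f x = g x) : l.flatMap f = l.flatMap g := by
  induction l with
  | nil => rfl
  | cons x xs ih =>
    simp only [List.flatMap_cons]
    rw [h x (by simp), ih (fun y hy => h y (by simp [hy]))]

lemma pvLoopA_acc (f : Int) (rest : List Int)
    (hG : ∀ ac cc sl, getAllCombination ac cc rest sl = ac ++ getAllCombination [] cc rest sl)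
    (idxs : List Int) : ∀ (ac : List (List (Int × Int))) (cc : List (Int × Int)) (sl : List Int),
    pvLoopA ac cc f rest sl idxs = ac ++ pvLoopA [] cc f rest sl idxs := by
  induction idxs with
  | nil => intro ac cc sl; simp [pvLoopA]
  | cons i is ih =>
    intro ac cc sl
    rw [pvLoopA, pvLoopA]
    cases hp : PySem.List.pop? sl i with
    | none => simp
    | some pr =>
      simp only
      rw [hG, ih, ih (getAllCombination [] (cc ++ [(f, pr.1)]) rest pr.2)]
      simp [List.append_assoc]

lemma getAllCombination_acc : ∀ (fl : List Int) (ac : List (List (Int × Int))) (cc : List (Int × Int)) (sl : List Int),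
    getAllCombination ac cc fl sl = ac ++ getAllCombination [] cc fl sl := by
  intro fl
  induction fl with
  | nil => intro ac cc sl; rw [getAllCombination, getAllCombination]; simp
  | cons f rest ih =>
    intro ac cc sl
    rw [getAllCombination, getAllCombination]
    by_cases h : (f :: rest).length = 1 ∧ sl.length = 1
    · simp [h]
    · simp only [if_neg h]
      rw [pvLoopA_acc f rest ih]

lemma pvLoopA_flatMap (f : Int) (rest sl : List Int) (cc : List (Int × Int)) :
    ∀ (ks : List Nat), (∀ k ∈ ks, k < sl.length) →
    pvLoopA [] cc f rest sl (ks.map (fun k : Nat => (k : Int))) =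
      ks.flatMap (fun k => getAllCombination [] (cc ++ [(f, sl.getD k 0)]) rest (sl.eraseIdx k)) := by
  intro ks
  induction ks with
  | nil => intro _; simp [pvLoopA.eq_def]
  | cons k kt ih =>
    intro h
    simp only [List.map_cons, List.flatMap_cons]
    rw [pvLoopA.eq_def]
    simp only [PySem.List.pop?_natCast sl k (h k (by simp))]

    rw [pvLoopA_acc f rest (fun ac cc sl => getAllCombination_acc rest ac cc sl),
        ih (fun x hx => h x (by simp [hx]))]
    rw [List.getD_eq_getElem sl 0 (h k (by simp))]

lemma pvRangeNat (n : Nat) : PySem.List.pyRange 0 (n : Int) 1 = (List.range n).map (fun k : Nat => (k : Int)) := by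
  rw [PySem.List.pyRange_one]
  simp

lemma pvStep_append (r1 r2 : List (List (Int × Int) × List Int)) (x : Int) :
    pvStep (r1 ++ r2) x = pvStep r1 x ++ pvStep r2 x := by
  simp [pvStep, List.flatMap_append]

lemma pvF_append (fl : List Int) : ∀ (r1 r2 : List (List (Int × Int) × List Int)),
    pvF fl (r1 ++ r2) = pvF fl r1 ++ pvF fl r2 := by
  induction fl with
  | nil => intro r1 r2; simp [pvF]
  | cons x xs ih =>
    intro r1 r2
    simp only [pvF, List.foldl_cons, pvStep_append]
    exact ih _ _

lemma pvF_nil_rows (fl : List Int) : pvF fl [] = [] := by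
  induction fl with
  | nil => rfl
  | cons x xs ih => simpa [pvF, pvStep] using ih

lemma pvF_flatMap (fl : List Int) : ∀ (rows : List (List (Int × Int) × List Int)),
    pvF fl rows = rows.flatMap (fun pr => pvF fl [pr]) := by
  intro rows
  induction rows with
  | nil => simp [pvF_nil_rows]
  | cons pr rt ih =>
    have : pr :: rt = [pr] ++ rt := rfl
    rw [this, pvF_append, ih]
    simp

lemma pvExpand_eq (x : Int) (cc : List (Int × Int)) (sl : List Int) :
    pvExpand x (cc, sl) =
      (List.range sl.length).map (fun k => (cc ++ [(x, sl.getD k 0)], sl.eraseIdx k)) := by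
  rw [pvExpand, PySem.List.pyRange_one]
  simp only [Int.sub_zero, Int.toNat_natCast, zero_add, List.map_map]
  apply List.map_congr_left
  intro k _
  simp only [Function.comp_apply]
  rw [PySem.List.pyGet?_natCast, PySem.List.slice_to_natCast]
  have h1 : (k : Int) + 1 = ((k + 1 : Nat) : Int) := by push_cast; ring
  rw [h1, PySem.List.slice_from_natCast, ← List.eraseIdx_eq_take_drop_succ, ← List.getD_eq_getElem?_getD]

lemma getAllCombination_nil_short : ∀ (fl : List Int) (cc : List (Int × Int)) (sl : List Int),
    fl.length < sl.length → getAllCombination [] cc fl sl = [] := by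
  intro fl
  induction fl with
  | nil =>
    intro cc sl h
    rw [getAllCombination]
    simp
  | cons f rest ih =>
    intro cc sl h
    rw [getAllCombination]
    have hne : ¬ ((f :: rest).length = 1 ∧ sl.length = 1) := by
      simp only [List.length_cons] at h ⊢; omega
    simp only [if_neg hne]
    rw [pvRangeNat, pvLoopA_flatMap f rest sl cc (List.range (f :: rest).length)
        (by intro k hk; simp only [List.mem_range, List.length_cons] at hk; simp only [List.length_cons] at h; omega)]
    apply List.flatMap_eq_nil_iff.mpr
    intro k hk
    simp only [List.mem_range] at hk
    apply ih
    have hk' : k < sl.length := by simp only [List.length_cons] at h hk; omega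
    simp only [List.length_eraseIdx, if_pos hk']
    simp only [List.length_cons] at h
    omega

lemma getAllCombination_main : ∀ (fl : List Int) (cc : List (Int × Int)) (sl : List Int),
    fl.length = sl.length → fl ≠ [] → getAllCombination [] cc fl sl = pvF fl [(cc, sl)] := by
  intro fl
  induction fl with
  | nil => intro _ _ _ hne; exact absurd rfl hne
  | cons f rest ih =>
    intro cc sl hlen _
    cases rest with
    | nil =>
      cases sl with
      | nil => simp at hlen
      | cons s t =>
        cases t with
        | cons b u => simp at hlen
        | nil =>
          rw [getAllCombination,
            if_pos (show (f :: ([] : List Int)).length = 1 ∧ (s :: ([] : List Int)).length = 1 from ⟨rfl, rfl⟩)]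
          show _ = pvF [f] [(cc, [s])]
          simp only [pvF, List.foldl_cons, List.foldl_nil, pvStep, List.flatMap_cons,
            List.flatMap_nil, List.append_nil, pvExpand_eq]
          simp
    | cons r rt =>
      rw [getAllCombination]
      have hne : ¬ ((f :: r :: rt).length = 1 ∧ sl.length = 1) := by
        rintro ⟨h1, _⟩; simp at h1
      simp only [if_neg hne]
      rw [pvRangeNat, pvLoopA_flatMap f (r :: rt) sl cc _
        (by intro k hk; simp only [List.mem_range] at hk; omega)]
      -- B side
      show _ = pvF (f :: r :: rt) [(cc, sl)]
      have hB : pvF (f :: r :: rt) [(cc, sl)] = pvF (r :: rt) (pvExpand f (cc, sl)) := by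
        simp [pvF, pvStep]
      rw [hB, pvExpand_eq, pvF_flatMap, List.flatMap_map]
      have hlfl : (f :: r :: rt).length = sl.length := hlen
      rw [← hlfl]
      apply pvFlatMap_congr
      intro k hk
      simp only [List.mem_range] at hk
      apply ih
      · have hk' : k < sl.length := by omega
        simp only [List.length_eraseIdx, if_pos hk']
        simp only [List.length_cons] at hlen ⊢
        omega
      · simp

-- ===== VERDICT (by name: the statement is the Claim_ definition above) =====
theorem getAllCombination_spec : Claim_equal_getAllCombination := by
  unfold Claim_equal_getAllCombination
  intro ac cc fl sl _ hpre
  unfold Spec_getAllCombination Pre_getAllCombination at *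
  cases fl with
  | nil =>
    rw [getAllCombination, getAllCombination_alt]
    simp
  | cons f rest =>
    rcases lt_or_eq_of_le hpre with hlt | heq
    · rw [getAllCombination_alt,
        if_pos (Or.inr (by intro hc; omega))]
      rw [getAllCombination_acc, getAllCombination_nil_short _ cc sl hlt]
      simp
    · rw [getAllCombination_alt,
        if_neg (by rintro (hc | hc)
                   · exact List.cons_ne_nil f rest hc
                   · exact hc heq)]
      rw [getAllCombination_acc, getAllCombination_main _ cc sl heq (List.cons_ne_nil f rest)]
      rfl
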